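-- pv_equiv track=rewrite | github.com/JHayoz/AtmosphericRetrieval_prototype | doubleRetrieval/util.py | nb_Cs
-- ===== SOURCE A (Python) =====
-- def nb_Cs(name):
--     Cs = 0
--     for i,char in enumerate(name):
--         if char == 'C':
--             if i < len(name)-1 and name[i+1].isdigit():
--                 Cs += int(name[i+1])
--             else:
--                 Cs += 1
--     return Cs
-- ===== SOURCE B (Python) =====
-- def nb_Cs(name):
--     total = 0
--     for seg in name.split('C')[1:]:
--         if seg[:1].isdigit():
--             total += int(seg[0])
--         else:
--             total += 1
--     return total
-- ===== Notes on version B (the rewrite author's own statement) =====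
-- stated objective: idiomatic
-- what changed: Replaces the indexed per-character scan with manual lookahead by splitting the string on the carbon symbol and summing one contribution per following segment (its leading digit, or 1).
import Mathlib
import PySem

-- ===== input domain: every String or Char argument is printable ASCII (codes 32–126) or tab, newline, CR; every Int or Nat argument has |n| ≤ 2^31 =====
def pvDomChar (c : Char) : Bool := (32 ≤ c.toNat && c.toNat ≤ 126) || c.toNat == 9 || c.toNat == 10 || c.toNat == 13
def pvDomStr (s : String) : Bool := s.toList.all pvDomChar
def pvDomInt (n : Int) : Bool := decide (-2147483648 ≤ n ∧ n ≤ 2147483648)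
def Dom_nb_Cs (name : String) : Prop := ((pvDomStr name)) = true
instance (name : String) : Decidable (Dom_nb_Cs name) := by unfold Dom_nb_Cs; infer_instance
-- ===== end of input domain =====

-- B replaces A's indexed scan with manual digit lookahead by splitting on 'C' and
-- summing one contribution per following segment (objective: idiomatic; same cost).

-- ===== PORT A =====
-- value of the ASCII digit char d, = Python's int(name[i+1]) on a digit (exact on ASCII digits)
def pvDigitVal (d : Char) : Int := (d.toNat : Int) - 48

-- A's enumerate loop: structural recursion over the character list with accumulator Cs;
-- the lookahead name[i+1] (guarded by i < len(name)-1) is the head of the remaining list.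
def nb_Cs_go : List Char → Int → Int
  | [], cs => cs
  | c :: rest, cs =>
    if c = 'C' then
      match rest with
      | d :: _ =>
        if PySem.Chars.isdigit d then nb_Cs_go rest (cs + pvDigitVal d)
        else nb_Cs_go rest (cs + 1)
      | [] => nb_Cs_go rest (cs + 1)
    else nb_Cs_go rest cs

def nb_Cs (name : String) : Int := nb_Cs_go name.toList 0

-- ===== PORT B =====
-- contribution of one segment following a 'C': its leading digit's value, else 1
def pvSegVal (seg : List Char) : Int :=
  match seg with
  | d :: _ => if PySem.Chars.isdigit d then pvDigitVal d else 1
  | [] => 1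

def nb_Cs_alt (name : String) : Int :=
  ((PySem.Chars.splitOn name.toList ['C']).drop 1).foldl
    (fun total seg => total + pvSegVal seg) 0

-- ===== PRECONDITION & SPEC =====
def Spec_nb_Cs (name : String) (out : Int) : Prop := out = nb_Cs_alt name
instance (name : String) (out : Int) : Decidable (Spec_nb_Cs name out) := by unfold Spec_nb_Cs; infer_instance

-- ===== CLAIM (what is proved, stated in full; the proofs are below) =====
def Claim_equal_nb_Cs : Prop := ∀ (name : String), Dom_nb_Cs name → Spec_nb_Cs name (nb_Cs name)

-- ===== LEMMAS AND PROOFS =====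

-- PySem's fueled split with a single-char separator is Batteries' splitOnP
theorem pv_splitOn_go_eq (fuel : Nat) (l cur : List Char) (acc : List (List Char))
    (hf : l.length < fuel) :
    PySem.Chars.splitOn.go ['C'] fuel l cur acc
      = acc.reverse ++ List.modifyHead (cur.reverse ++ ·) (List.splitOnP (· == 'C') l) := by
  induction fuel generalizing l cur acc with
  | zero => omega
  | succ f ih =>
    cases l with
    | nil =>
      rw [PySem.Chars.splitOn.go.eq_def]
      simp [List.splitOnP_nil]
    | cons c rest =>
      by_cases hc : c = 'C'
      · subst hc
        have hpre : List.isPrefixOf ['C'] ('C' :: rest) = true := by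
          simp [List.isPrefixOf]
        rw [PySem.Chars.splitOn.go.eq_def]
        simp only [hpre, if_pos]
        simp only [List.length_cons] at hf
        simp only [List.length_cons, List.length_nil, List.drop_succ_cons, List.drop_zero]
        rw [ih rest [] ((cur.reverse) :: acc) (by omega)]
        rw [List.splitOnP_cons, if_pos (by simp)]
        cases h : List.splitOnP (· == 'C') rest with
        | nil => exact absurd h (List.splitOnP_ne_nil _ _)
        | cons s t => simp
      · have hpre : List.isPrefixOf ['C'] (c :: rest) = false := by
          simp [List.isPrefixOf]; exact Ne.symm hc
        rw [PySem.Chars.splitOn.go.eq_def]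
        simp only [hpre, Bool.false_eq_true, if_false]
        simp only [List.length_cons] at hf
        rw [ih rest (c :: cur) acc (by omega)]
        rw [List.splitOnP_cons, if_neg (by simp [hc]), List.modifyHead_modifyHead]
        congr 1
        cases List.splitOnP (· == 'C') rest with
        | nil => rfl
        | cons s t => simp

theorem pv_splitOn_eq (s : List Char) :
    PySem.Chars.splitOn s ['C'] = List.splitOnP (· == 'C') s := by
  rw [PySem.Chars.splitOn, pv_splitOn_go_eq (s.length + 1) s [] [] (by omega)]
  cases h : List.splitOnP (· == 'C') s with
  | nil => exact absurd h (List.splitOnP_ne_nil _ _)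
  | cons a t => simp

-- the head segment of the split carries exactly A's lookahead contribution
theorem pv_head_seg (l : List Char) :
    pvSegVal ((List.splitOnP (· == 'C') l).headI) = pvSegVal l := by
  cases l with
  | nil => simp [List.splitOnP_nil]
  | cons d r =>
    by_cases hd : d = 'C'
    · subst hd
      rw [List.splitOnP_cons, if_pos (by simp)]
      simp [pvSegVal, PySem.Chars.isdigit]
    · rw [List.splitOnP_cons, if_neg (by simp [hd])]
      cases h : List.splitOnP (· == 'C') r with
      | nil => exact absurd h (List.splitOnP_ne_nil _ _)
      | cons s t => simp [pvSegVal]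

-- A's step at a 'C' adds the lookahead contribution pvSegVal rest
theorem pv_go_C (rest : List Char) (acc : Int) :
    nb_Cs_go ('C' :: rest) acc = nb_Cs_go rest (acc + pvSegVal rest) := by
  cases rest with
  | nil => simp [nb_Cs_go, pvSegVal]
  | cons d r =>
    by_cases hdig : PySem.Chars.isdigit d
    · simp [nb_Cs_go, pvSegVal, hdig]
    · simp [nb_Cs_go, pvSegVal, hdig]

-- pull the accumulator out of B's fold
theorem pv_foldl_acc (segs : List (List Char)) (a : Int) :
    segs.foldl (fun total seg => total + pvSegVal seg) a
      = a + segs.foldl (fun total seg => total + pvSegVal seg) 0 := by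
  induction segs generalizing a with
  | nil => simp
  | cons s t ih =>
    simp only [List.foldl_cons]
    rw [ih (a + pvSegVal s), ih (0 + pvSegVal s)]
    ring

-- main invariant: A's scan from acc equals acc plus B's sum over the split's tail
theorem pv_main (l : List Char) (acc : Int) :
    nb_Cs_go l acc
      = acc + ((List.splitOnP (· == 'C') l).drop 1).foldl
          (fun total seg => total + pvSegVal seg) 0 := by
  induction l generalizing acc with
  | nil => simp [nb_Cs_go, List.splitOnP_nil]
  | cons c rest ih =>
    by_cases hc : c = 'C'
    · subst hc
      rw [List.splitOnP_cons, if_pos (by simp), pv_go_C, ih]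
      cases h : List.splitOnP (· == 'C') rest with
      | nil => exact absurd h (List.splitOnP_ne_nil _ _)
      | cons s t =>
        have hhead := pv_head_seg rest
        rw [h] at hhead
        simp only [List.headI] at hhead
        simp only [List.drop_succ_cons, List.drop_zero, List.foldl_cons]
        rw [pv_foldl_acc t (0 + pvSegVal s), ← hhead]
        ring
    · rw [List.splitOnP_cons, if_neg (by simp [hc])]
      have hA : nb_Cs_go (c :: rest) acc = nb_Cs_go rest acc := by
        simp [nb_Cs_go, hc]
      rw [hA, ih acc]
      congr 2
      cases List.splitOnP (· == 'C') rest with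
      | nil => rfl
      | cons s t => simp

-- ===== VERDICT (by name: the statement is the Claim_ definition above) =====
theorem nb_Cs_spec : Claim_equal_nb_Cs := by
  intro name _
  unfold Spec_nb_Cs nb_Cs nb_Cs_alt
  rw [pv_splitOn_eq, pv_main]
  simp
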